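-- pv_equiv track=rewrite | github.com/GUAN-XINGQUAN/LeetCode | 759EmployeeFreeTime-MergingIntervals-Medium.py | solution
-- ===== SOURCE A (Python) =====
-- def solution(arr):
--     newArr = []
--     for emp in arr:
--         for t in emp:
--             newArr.append(t)
--     newArr.sort()
--     if not newArr:
--         return []
--     ans = []
--     maxEnd = newArr[0][1]
--     for interval in newArr:
--         startTime = interval[0]
--         endTime = interval[1]
--         if startTime > maxEnd:
--             ans.append([maxEnd, startTime])
--             maxEnd = endTime
--         elif startTime <= maxEnd and endTime <= maxEnd:
--             pass
--         elif startTime <= maxEnd and endTime > maxEnd: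
--             maxEnd = endTime
--     return ans
-- ===== SOURCE B (Python) =====
-- def solution(arr):
--     # Sort each employee's schedule separately, combine the sorted runs with a
--     # divide-and-conquer two-pointer merge (k-way merge), then scan once for gaps.
--     def merge2(xs, ys):
--         out = []
--         i = j = 0
--         while i < len(xs) and j < len(ys):
--             if ys[j] < xs[i]:
--                 out.append(ys[j])
--                 j += 1
--             else:
--                 out.append(xs[i])
--                 i += 1
--         return out + xs[i:] + ys[j:]
--
--     def merge_all(runs):
--         if not runs:
--             return []
--         if len(runs) == 1:
--             return runs[0]
--         mid = len(runs) // 2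
--         return merge2(merge_all(runs[:mid]), merge_all(runs[mid:]))
--
--     busy = merge_all([sorted(emp) for emp in arr])
--     if not busy:
--         return []
--     free = []
--     reach = busy[0][1]
--     for t in busy:
--         if t[0] > reach:
--             free.append([reach, t[0]])
--             reach = t[1]
--         elif t[1] > reach:
--             reach = t[1]
--     return free
-- ===== Notes on version B (the rewrite author's own statement) =====
-- stated objective: alternative
-- what changed: A flattens all intervals into one list and comparison-sorts it globally before its gap scan; B never builds a globally sorted list by sorting: it sorts each employee's schedule separately and combines the k sorted runs with a divide-and-conquer two-pointer merge (k-way merge), then scans the merged stream for gaps.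
import Mathlib
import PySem

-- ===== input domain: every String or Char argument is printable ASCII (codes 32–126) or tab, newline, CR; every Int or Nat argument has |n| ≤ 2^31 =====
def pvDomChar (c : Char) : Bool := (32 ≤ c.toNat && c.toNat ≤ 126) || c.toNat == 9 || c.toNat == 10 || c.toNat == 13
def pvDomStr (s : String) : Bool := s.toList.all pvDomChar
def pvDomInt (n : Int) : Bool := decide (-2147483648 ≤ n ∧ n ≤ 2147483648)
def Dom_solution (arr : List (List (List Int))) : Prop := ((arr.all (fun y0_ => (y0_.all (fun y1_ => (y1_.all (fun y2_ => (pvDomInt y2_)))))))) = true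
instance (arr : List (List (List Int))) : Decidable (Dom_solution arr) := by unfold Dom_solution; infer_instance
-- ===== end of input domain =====

-- B replaces A's flatten-then-global-comparison-sort by sorting each employee's
-- schedule separately and combining the k sorted runs with a divide-and-conquer
-- two-pointer merge, then scans the merged stream once for the free gaps.

-- ===== PORT A =====
-- loop body of A's scan: the three if/elif branches over the state (ans, maxEnd)
def pvStepA (st : List (List Int) × Int) (interval : List Int) : List (List Int) × Int :=
  let startTime := (PySem.List.pyGet? interval 0).getD 0
  let endTime := (PySem.List.pyGet? interval 1).getD 0
  if startTime > st.2 then (st.1 ++ [[st.2, startTime]], endTime)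
  else if startTime ≤ st.2 ∧ endTime ≤ st.2 then st
  else if startTime ≤ st.2 ∧ endTime > st.2 then (st.1, endTime)
  else st

def solution (arr : List (List (List Int))) : List (List Int) :=
  -- newArr = []; for emp in arr: for t in emp: newArr.append(t); newArr.sort()
  let newArr := arr.foldl (fun acc emp => emp.foldl (fun a t => a ++ [t]) acc) []
  let sortedArr := PySem.List.sorted newArr (fun t => t) false
  match sortedArr with
  | [] => []
  | first :: rest =>
      (((first :: rest).foldl pvStepA ([], (PySem.List.pyGet? first 1).getD 0)).1)

-- ===== PORT B =====
-- Source B's merge2: the two-pointer while loop, as the same head-consuming recursion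
def pvMerge2 : List (List Int) → List (List Int) → List (List Int)
  | [], ys => ys
  | x :: xs, [] => x :: xs
  | x :: xs, y :: ys =>
      if y < x then y :: pvMerge2 (x :: xs) ys
      else x :: pvMerge2 xs (y :: ys)
termination_by xs ys => xs.length + ys.length

-- Source B's merge_all: divide and conquer over the list of sorted runs
def pvMergeAll : List (List (List Int)) → List (List Int)
  | [] => []
  | [r] => r
  | r1 :: r2 :: rest =>
      let runs := r1 :: r2 :: rest
      let mid := runs.length / 2
      pvMerge2 (pvMergeAll (runs.take mid)) (pvMergeAll (runs.drop mid))
termination_by rs => rs.length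
decreasing_by all_goals simp; omega

-- loop body of Source B's gap scan over the state (free, reach)
def pvStepB (st : List (List Int) × Int) (t : List Int) : List (List Int) × Int :=
  let s := (PySem.List.pyGet? t 0).getD 0
  let e := (PySem.List.pyGet? t 1).getD 0
  if s > st.2 then (st.1 ++ [[st.2, s]], e)
  else if e > st.2 then (st.1, e)
  else st

def solution_alt (arr : List (List (List Int))) : List (List Int) :=
  let busy := pvMergeAll (arr.map (fun emp => PySem.List.sorted emp (fun t => t) false))
  match busy with
  | [] => []
  | first :: rest =>
      (((first :: rest).foldl pvStepB ([], (PySem.List.pyGet? first 1).getD 0)).1)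

-- ===== PRECONDITION & SPEC =====
-- Pre_ excludes exactly the inputs on which Python A raises IndexError:
-- some busy interval has fewer than two entries (t[0]/t[1] out of range).
def Pre_solution (arr : List (List (List Int))) : Prop :=
  ∀ emp ∈ arr, ∀ t ∈ emp, 2 ≤ t.length
instance (arr : List (List (List Int))) : Decidable (Pre_solution arr) := by
  unfold Pre_solution; infer_instance

def pvWitness_solution : List (List (List Int)) := [[[0, 2], [5, 7]], [[1, 3]]]

def Spec_solution (arr : List (List (List Int))) (out : List (List Int)) : Prop :=
  out = solution_alt arr
instance (arr : List (List (List Int))) (out : List (List Int)) : Decidable (Spec_solution arr out) := by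
  unfold Spec_solution; infer_instance

-- ===== CLAIM (what is proved, stated in full; the proofs are below) =====
def Claim_equal_solution : Prop := ∀ (arr : List (List (List Int))), Dom_solution arr → Pre_solution arr → Spec_solution arr (solution arr)

-- ===== LEMMAS AND PROOFS =====

-- a ≤ b for Python lists of ints (the negation of the core lexicographic <)
def pvLe (a b : List Int) : Prop := ¬ (b < a)

-- sorted at the core List-LT instance is sorted at the Mathlib LinearOrder instance
lemma pv_sorted_inst (xs : List (List Int)) :
    (@PySem.List.sorted (List Int) (List Int)
      (@Preorder.toLT _ (@PartialOrder.toPreorder _ (@LinearOrder.toPartialOrder _ List.instLinearOrder)))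
      (@LinearOrder.toDecidableLT _ List.instLinearOrder) xs (fun t => t) false)
    = PySem.List.sorted xs (fun t => t) false := by
  congr 1

lemma pvLe_iff (a b : List Int) : pvLe a b ↔
    @LE.le _ (@Preorder.toLE _ (@PartialOrder.toPreorder _ (@LinearOrder.toPartialOrder _ List.instLinearOrder))) a b := by
  constructor
  · intro h; exact not_lt.mp h
  · intro h hlt; exact absurd h (not_le_of_gt hlt)

lemma pvLe_of_lt {a b : List Int} (h : a < b) : pvLe a b :=
  (pvLe_iff a b).mpr (le_of_lt h)

lemma pvLe_trans {a b c : List Int} (h1 : pvLe a b) (h2 : pvLe b c) : pvLe a c :=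
  (pvLe_iff a c).mpr (le_trans ((pvLe_iff a b).mp h1) ((pvLe_iff b c).mp h2))

lemma pv_pairwise_core (xs : List (List Int)) :
    (PySem.List.sorted xs (fun t => t) false).Pairwise pvLe := by
  have h := @PySem.List.sorted_pairwise (List Int) (List Int) List.instLinearOrder xs (fun t => t)
  rw [pv_sorted_inst] at h
  exact h.imp (fun {a b} hab => (pvLe_iff a b).mpr hab)

-- the sorted order named: any pvLe-ordered rearrangement of xs IS sorted(xs)
lemma pv_sorted_eq (xs ys : List (List Int)) (hp : ys.Perm xs) (hs : ys.Pairwise pvLe) :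
    PySem.List.sorted xs (fun t => t) false = ys := by
  have h := @PySem.List.sorted_id_eq_of_perm_of_pairwise (List Int) List.instLinearOrder xs ys hp
    (hs.imp (fun {a b} hab => (pvLe_iff a b).mp hab))
  rw [pv_sorted_inst] at h
  exact h

lemma pvMerge2_perm (xs ys : List (List Int)) : (pvMerge2 xs ys).Perm (xs ++ ys) := by
  fun_induction pvMerge2 with
  | case1 ys => simp
  | case2 x xs => simp
  | case3 x xs y ys h ih =>
      refine (ih.cons y).trans ?_
      exact (List.perm_middle).symm
  | case4 x xs y ys h ih => exact ih.cons x

lemma pvMerge2_pairwise (xs ys : List (List Int)) (hx : xs.Pairwise pvLe) (hy : ys.Pairwise pvLe) :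
    (pvMerge2 xs ys).Pairwise pvLe := by
  fun_induction pvMerge2 with
  | case1 ys => exact hy
  | case2 x xs => exact hx
  | case3 x xs y ys h ih =>
      refine List.pairwise_cons.mpr ⟨?_, ih hx hy.tail⟩
      intro z hz
      have hz' := (pvMerge2_perm (x :: xs) ys).mem_iff.mp hz
      simp only [List.mem_append, List.mem_cons] at hz'
      rcases hz' with (rfl | hz') | hz'
      · exact pvLe_of_lt h
      · exact pvLe_trans (pvLe_of_lt h) ((List.pairwise_cons.mp hx).1 z hz')
      · exact (List.pairwise_cons.mp hy).1 z hz'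
  | case4 x xs y ys h ih =>
      refine List.pairwise_cons.mpr ⟨?_, ih hx.tail hy⟩
      intro z hz
      have hz' := (pvMerge2_perm xs (y :: ys)).mem_iff.mp hz
      simp only [List.mem_append, List.mem_cons] at hz'
      rcases hz' with hz' | (rfl | hz')
      · exact (List.pairwise_cons.mp hx).1 z hz'
      · exact h
      · exact pvLe_trans h ((List.pairwise_cons.mp hy).1 z hz')

lemma pvMergeAll_perm (rs : List (List (List Int))) : (pvMergeAll rs).Perm rs.flatten := by
  fun_induction pvMergeAll with
  | case1 => simp
  | case2 r => simp
  | case3 r1 r2 rest runs mid ih1 ih2 =>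
      refine (pvMerge2_perm _ _).trans ?_
      refine (ih1.append ih2).trans ?_
      rw [← List.flatten_append, List.take_append_drop]

lemma pvMergeAll_pairwise (rs : List (List (List Int))) (h : ∀ r ∈ rs, r.Pairwise pvLe) :
    (pvMergeAll rs).Pairwise pvLe := by
  fun_induction pvMergeAll with
  | case1 => exact List.Pairwise.nil
  | case2 r => exact h r (by simp)
  | case3 r1 r2 rest runs mid ih1 ih2 =>
      exact pvMerge2_pairwise _ _
        (ih1 (fun r hr => h r (List.mem_of_mem_take hr)))
        (ih2 (fun r hr => h r (List.mem_of_mem_drop hr)))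

lemma pv_flatten (arr : List (List (List Int))) :
    arr.foldl (fun acc emp => emp.foldl (fun a t => a ++ [t]) acc) [] = arr.flatten := by
  suffices h : ∀ (acc : List (List Int)),
      arr.foldl (fun acc emp => emp.foldl (fun a t => a ++ [t]) acc) acc = acc ++ arr.flatten by
    simpa using h []
  induction arr with
  | nil => simp
  | cons emp arr ih =>
      intro acc
      rw [List.foldl_cons, PySem.List.foldl_append_singleton, ih]
      simp

lemma pv_flatten_map_sorted (arr : List (List (List Int))) :
    ((arr.map (fun emp => PySem.List.sorted emp (fun t => t) false)).flatten).Perm arr.flatten := by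
  induction arr with
  | nil => simp
  | cons emp arr ih =>
      simp only [List.map_cons, List.flatten_cons]
      exact (PySem.List.sorted_perm emp (fun t => t) false).append ih

-- the heart: A's globally sorted interval list IS B's k-way merge of per-employee sorts
lemma pv_sorted_busy (arr : List (List (List Int))) :
    PySem.List.sorted (arr.foldl (fun acc emp => emp.foldl (fun a t => a ++ [t]) acc) []) (fun t => t) false
      = pvMergeAll (arr.map (fun emp => PySem.List.sorted emp (fun t => t) false)) := by
  rw [pv_flatten]
  apply pv_sorted_eq
  · exact (pvMergeAll_perm _).trans (pv_flatten_map_sorted arr)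
  · refine pvMergeAll_pairwise _ ?_
    intro r hr
    simp only [List.mem_map] at hr
    obtain ⟨emp, -, rfl⟩ := hr
    exact pv_pairwise_core emp

-- A's three-branch scan body and B's two-branch scan body are the same function
lemma pvStep_eq : pvStepA = pvStepB := by
  funext st t
  simp only [pvStepA, pvStepB]
  split_ifs <;> first | rfl | omega

-- ===== VERDICT (by name: the statement is the Claim_ definition above) =====
theorem solution_spec : Claim_equal_solution := by
  intro arr _ _
  unfold Spec_solution solution solution_alt
  simp only
  rw [pv_sorted_busy arr, pvStep_eq]
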